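-- pv_equiv track=rewrite | github.com/20130353/Leetcode | target_offer/数字题/字符串距离.py | solution
-- ===== SOURCE A (Python) =====
-- def solution(s, t, n, m):
--     a = [0]
--     for i in range(n):
--         if s[i] == 'a':
--             a.append(a[-1] + 1)
--         else:
--             a.append(a[-1])
--     res = 0
--     delta = n - m + 1
--     for j in range(m):
--         if t[j] == 'a':
--             # j + delta 表示总的字符个数
--             # j + delta - a[j + delta] 表示总字符个数-a的个数=b的个数
--             res += j + delta - a[j + delta] - (j - a[j])
--         else:
--             res += a[j + delta] - a[j]
--     return res
-- ===== SOURCE B (Python) =====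
-- def solution(s, t, n, m):
--     # sum of binarized mismatches over every alignment of t against a window of s
--     if m <= 0:
--         return 0
--     delta = n - m + 1
--     res = 0
--     for d in range(delta):
--         for j in range(m):
--             if (s[d + j] == 'a') != (t[j] == 'a'):
--                 res += 1
--     return res
-- ===== Notes on version B (the rewrite author's own statement) =====
-- stated objective: simpler
-- what changed: Replaced A's prefix-count table of 'a's and per-position window arithmetic by a direct double loop over all alignment shifts that just counts positions where the binarized characters (== 'a') differ.
-- intended difference: On n=-1, m=1 with t[0]=='a' (no characters of s in play, one alignment too few), A returns -1 via Python's negative-index wraparound a[-1], while B returns 0, the intended count over the empty set of alignments. — e.g. on solution("", "a", -1, 1): A returns -1, B returns 0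
import Mathlib
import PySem

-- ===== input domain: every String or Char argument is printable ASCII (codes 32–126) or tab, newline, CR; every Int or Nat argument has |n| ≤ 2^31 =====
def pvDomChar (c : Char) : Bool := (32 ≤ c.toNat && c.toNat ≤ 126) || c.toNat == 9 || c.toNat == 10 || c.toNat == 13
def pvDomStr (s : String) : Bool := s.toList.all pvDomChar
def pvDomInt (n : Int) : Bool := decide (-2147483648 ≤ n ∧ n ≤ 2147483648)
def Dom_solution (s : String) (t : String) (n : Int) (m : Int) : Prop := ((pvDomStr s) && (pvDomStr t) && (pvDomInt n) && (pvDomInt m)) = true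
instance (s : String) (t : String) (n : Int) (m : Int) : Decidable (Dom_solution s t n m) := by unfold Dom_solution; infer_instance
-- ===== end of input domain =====

-- B replaces A's prefix-count table by a direct double loop over alignment shifts counting binarized mismatches (same cost class on the admitted sizes; chosen for simplicity, not speed).


-- ===== PORT A =====
-- a.append(a[-1] + 1) / a.append(a[-1]) step of A's prefix-count loop
def aStep (cs : List Char) (a : List Int) (i : Int) : List Int :=
  if PySem.List.pyGetD cs i ' ' = 'a' then a ++ [PySem.List.pyGetD a (-1) 0 + 1]
  else a ++ [PySem.List.pyGetD a (-1) 0]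

def solution (s : String) (t : String) (n : Int) (m : Int) : Int :=
  let a := (PySem.List.pyRange 0 n 1).foldl (aStep s.toList) [0]
  let delta := n - m + 1
  (PySem.List.pyRange 0 m 1).foldl (fun res j =>
    if PySem.List.pyGetD t.toList j ' ' = 'a' then
      res + (j + delta - PySem.List.pyGetD a (j + delta) 0 - (j - PySem.List.pyGetD a j 0))
    else
      res + (PySem.List.pyGetD a (j + delta) 0 - PySem.List.pyGetD a j 0)) 0

-- ===== PORT B =====
def solution_alt (s : String) (t : String) (n : Int) (m : Int) : Int :=
  if m ≤ 0 then 0 else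
  let delta := n - m + 1
  (PySem.List.pyRange 0 delta 1).foldl (fun res d =>
    (PySem.List.pyRange 0 m 1).foldl (fun res j =>
      if (PySem.List.pyGetD s.toList (d + j) ' ' = 'a') ≠ (PySem.List.pyGetD t.toList j ' ' = 'a')
      then res + 1 else res) res) 0

-- ===== PRECONDITION & SPEC =====
-- Pre_ is exactly the set of inputs on which the Python A returns (no IndexError): the prefix loop
-- needs n ≤ len(s) unless it is empty, and for m > 0 the second loop needs m ≤ len(t) together with
-- every index into the prefix list a (of length max(n,0)+1) being valid, i.e. m ≤ max(n,0)+1 and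
-- m ≤ n+2+max(n,0) (the latter keeps a[j+delta] ≥ -len(a), Python's wraparound floor).
def Pre_solution (s : String) (t : String) (n : Int) (m : Int) : Prop :=
  (n ≤ (s.toList.length : Int) ∨ n ≤ 0) ∧
  (m ≤ 0 ∨ (m ≤ (t.toList.length : Int) ∧ m ≤ max n 0 + 1 ∧ m ≤ n + 2 + max n 0))
instance (s : String) (t : String) (n : Int) (m : Int) : Decidable (Pre_solution s t n m) := by
  unfold Pre_solution; infer_instance

def pvWitness_solution : String × String × Int × Int := ("ababa", "ab", 5, 2)

-- On n = -1, m = 1 with t[0] == 'a' (one alignment too few, no character of s in play) A returns -1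
-- via Python's negative-index wraparound a[-1], while B returns 0, the intended count over the empty
-- set of alignments.
def D_solution (s : String) (t : String) (n : Int) (m : Int) : Prop :=
  n = -1 ∧ m = 1 ∧ t.toList.head? = some 'a'
instance (s : String) (t : String) (n : Int) (m : Int) : Decidable (D_solution s t n m) := by
  unfold D_solution; infer_instance

def Spec_solution (s : String) (t : String) (n : Int) (m : Int) (out : Int) : Prop :=
  ¬ D_solution s t n m → out = solution_alt s t n m
instance (s : String) (t : String) (n : Int) (m : Int) (out : Int) : Decidable (Spec_solution s t n m out) := by
  unfold Spec_solution; infer_instance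

def pvDiffWitness_solution : String × String × Int × Int := ("", "a", -1, 1)
def pvDiffWitnessOut_solution : Int × Int := (-1, 0)

-- ===== CLAIM (what is proved, stated in full; the proofs are below) =====
def Claim_unchanged_solution : Prop := ∀ (s : String) (t : String) (n : Int) (m : Int), Dom_solution s t n m → Pre_solution s t n m → Spec_solution s t n m (solution s t n m)
def Claim_changed_solution : Prop := Dom_solution (pvDiffWitness_solution.1) (pvDiffWitness_solution.2.1) (pvDiffWitness_solution.2.2.1) (pvDiffWitness_solution.2.2.2) ∧ Pre_solution (pvDiffWitness_solution.1) (pvDiffWitness_solution.2.1) (pvDiffWitness_solution.2.2.1) (pvDiffWitness_solution.2.2.2) ∧ D_solution (pvDiffWitness_solution.1) (pvDiffWitness_solution.2.1) (pvDiffWitness_solution.2.2.1) (pvDiffWitness_solution.2.2.2) ∧ solution (pvDiffWitness_solution.1) (pvDiffWitness_solution.2.1) (pvDiffWitness_solution.2.2.1) (pvDiffWitness_solution.2.2.2) = pvDiffWitnessOut_solution.1 ∧ solution_alt (pvDiffWitness_solution.1) (pvDiffWitness_solution.2.1) (pvDiffWitness_solution.2.2.1) (pvDiffWitness_solution.2.2.2)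 = pvDiffWitnessOut_solution.2 ∧ pvDiffWitnessOut_solution.1 ≠ pvDiffWitnessOut_solution.2
def Claim_exact_solution : Prop := ∀ (s : String) (t : String) (n : Int) (m : Int), Dom_solution s t n m → Pre_solution s t n m → D_solution s t n m → solution s t n m ≠ solution_alt s t n m

-- ===== LEMMAS AND PROOFS =====

-- number of 'a's among the first k characters
def cntA (cs : List Char) (k : Nat) : Nat := (cs.take k).countP (fun c => c = 'a')

theorem cntA_succ (cs : List Char) (N : Nat) (h : N < cs.length) :
    cntA cs (N + 1) = cntA cs N + (if cs[N] = 'a' then 1 else 0) := by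
  unfold cntA
  rw [List.take_add_one, List.countP_append, List.getElem?_eq_getElem h]
  by_cases hc : cs[N] = 'a' <;> simp [hc]

theorem aList_eq (cs : List Char) (N : Nat) (h : N ≤ cs.length) :
    (PySem.List.pyRange 0 (N : Int) 1).foldl (aStep cs) [0]
      = (List.range (N + 1)).map (fun k => (cntA cs k : Int)) := by
  induction N with
  | zero => simp [PySem.List.pyRange_one_eq_nil, cntA]
  | succ N ih =>
    have hN : N < cs.length := h
    have h0 : ((N + 1 : Nat) : Int) = (N : Int) + 1 := by push_cast; ring
    rw [h0, PySem.List.pyRange_one_succ_right (by positivity), List.foldl_append,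
        ih (le_of_lt hN)]
    have hrw : (List.range (N + 1)).map (fun k => (cntA cs k : Int))
        = (List.range N).map (fun k => (cntA cs k : Int)) ++ [(cntA cs N : Int)] := by
      simp [List.range_succ]
    simp only [List.foldl_cons, List.foldl_nil, hrw, aStep,
      PySem.List.pyGetD_neg_one_append_singleton, PySem.List.pyGetD_natCast,
      List.getD_eq_getElem?_getD, List.getElem?_eq_getElem hN, Option.getD_some]
    rw [List.range_succ (n := N + 1)]
    simp [cntA_succ cs N hN]
    split <;> simp [List.range_succ]

theorem list_sum_range (f : Nat → Int) (n : Nat) :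
    ((List.range n).map f).sum = ∑ i ∈ Finset.range n, f i := rfl

theorem solution_eq_sum (s t : String) (N M : Nat) (hs : N ≤ s.toList.length)
    (hM : M ≤ N + 1) :
    solution s t (N : Int) (M : Int)
      = ∑ j ∈ Finset.range M,
          (if t.toList.getD j ' ' = 'a'
           then ((N + 1 - M : Nat) : Int) - ((cntA s.toList (j + (N + 1 - M)) : Nat) - (cntA s.toList j : Nat) : Int)
           else ((cntA s.toList (j + (N + 1 - M)) : Nat) : Int) - (cntA s.toList j : Nat)) := by
  have hδ : (N : Int) - (M : Int) + 1 = ((N + 1 - M : Nat) : Int) := by push_cast [hM]; ring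
  simp only [solution]
  rw [aList_eq s.toList N hs]
  have hfun : ∀ (a : List Int) (delta : Int),
      (fun (res j : Int) =>
        if PySem.List.pyGetD t.toList j ' ' = 'a' then
          res + (j + delta - PySem.List.pyGetD a (j + delta) 0 - (j - PySem.List.pyGetD a j 0))
        else
          res + (PySem.List.pyGetD a (j + delta) 0 - PySem.List.pyGetD a j 0))
      = fun res j => res + (if PySem.List.pyGetD t.toList j ' ' = 'a' then
          (j + delta - PySem.List.pyGetD a (j + delta) 0 - (j - PySem.List.pyGetD a j 0))
        else
          (PySem.List.pyGetD a (j + delta) 0 - PySem.List.pyGetD a j 0)) := by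
    intro a delta; funext res j; split <;> rfl
  rw [hfun, PySem.List.foldl_add, PySem.List.pyRange_one]
  simp only [Int.sub_zero, Int.toNat_natCast, List.map_map, list_sum_range, zero_add]
  apply Finset.sum_congr rfl
  intro j hj
  have hj' : j < M := Finset.mem_range.mp hj
  have h1 : j + (N + 1 - M) < N + 1 := by omega
  have h2 : j < N + 1 := by omega
  have hc : ((j : Nat) : Int) + ((N : Int) - (M : Int) + 1) = ((j + (N + 1 - M) : Nat) : Int) := by
    push_cast [hM]; ring
  simp only [Function.comp, zero_add, hc, PySem.List.pyGetD_natCast,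
    PySem.List.getD_map_range _ _ _ _ h1, PySem.List.getD_map_range _ _ _ _ h2]
  split
  · push_cast [hM]; ring
  · rfl

theorem cntA_succ' (cs : List Char) (k : Nat) :
    cntA cs (k + 1) = cntA cs k + (if cs.getD k ' ' = 'a' then 1 else 0) := by
  by_cases h : k < cs.length
  · rw [cntA_succ cs k h, List.getD_eq_getElem?_getD, List.getElem?_eq_getElem h, Option.getD_some]
  · unfold cntA
    rw [List.take_of_length_le (by omega), List.take_of_length_le (by omega),
        List.getD_eq_getElem?_getD, List.getElem?_eq_none (by omega)]
    simp

theorem cnt_window (cs : List Char) (j D : Nat) :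
    (cntA cs (j + D) : Int) - (cntA cs j : Int)
      = ∑ d ∈ Finset.range D, (if cs.getD (j + d) ' ' = 'a' then (1 : Int) else 0) := by
  induction D with
  | zero => simp
  | succ D ih =>
    rw [Finset.sum_range_succ, ← ih, ← Nat.add_assoc, cntA_succ']
    split <;> push_cast <;> ring

theorem alt_eq_sum (s t : String) (D M : Nat) :
    (PySem.List.pyRange 0 (D : Int) 1).foldl (fun res d =>
      (PySem.List.pyRange 0 (M : Int) 1).foldl (fun res j =>
        if (PySem.List.pyGetD s.toList (d + j) ' ' = 'a') ≠ (PySem.List.pyGetD t.toList j ' ' = 'a')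
        then res + 1 else res) res) 0
      = ∑ d ∈ Finset.range D, ∑ j ∈ Finset.range M,
          (if (s.toList.getD (d + j) ' ' = 'a') ≠ (t.toList.getD j ' ' = 'a') then (1 : Int) else 0) := by
  have inner : ∀ (res dd : Int),
      (PySem.List.pyRange 0 (M : Int) 1).foldl (fun res j =>
        if (PySem.List.pyGetD s.toList (dd + j) ' ' = 'a') ≠ (PySem.List.pyGetD t.toList j ' ' = 'a')
        then res + 1 else res) res
      = res + ∑ j ∈ Finset.range M,
          (if (PySem.List.pyGetD s.toList (dd + (j : Nat)) ' ' = 'a') ≠ (t.toList.getD j ' ' = 'a')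
           then (1 : Int) else 0) := by
    intro res dd
    have hfun : (fun (res j : Int) =>
        if (PySem.List.pyGetD s.toList (dd + j) ' ' = 'a') ≠ (PySem.List.pyGetD t.toList j ' ' = 'a')
        then res + 1 else res)
        = fun res j => res + (if (PySem.List.pyGetD s.toList (dd + j) ' ' = 'a') ≠ (PySem.List.pyGetD t.toList j ' ' = 'a') then 1 else 0) := by
      funext res j; split
      · rfl
      · exact (add_zero res).symm
    rw [hfun, PySem.List.foldl_add, PySem.List.pyRange_one]
    simp only [Int.sub_zero, Int.toNat_natCast, List.map_map, list_sum_range]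
    congr 1
    apply Finset.sum_congr rfl
    intro j hj
    simp only [Function.comp, zero_add, PySem.List.pyGetD_natCast]
  have hfun2 : (fun (res d : Int) =>
      (PySem.List.pyRange 0 (M : Int) 1).foldl (fun res j =>
        if (PySem.List.pyGetD s.toList (d + j) ' ' = 'a') ≠ (PySem.List.pyGetD t.toList j ' ' = 'a')
        then res + 1 else res) res)
      = fun res d => res + ∑ j ∈ Finset.range M,
          (if (PySem.List.pyGetD s.toList (d + (j : Nat)) ' ' = 'a') ≠ (t.toList.getD j ' ' = 'a')
           then (1 : Int) else 0) := by
    funext res d; exact inner res d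
  rw [hfun2, PySem.List.foldl_add, PySem.List.pyRange_one]
  simp only [Int.sub_zero, Int.toNat_natCast, List.map_map, list_sum_range, zero_add]
  apply Finset.sum_congr rfl
  intro d hd
  apply Finset.sum_congr rfl
  intro j hj
  have hc : ((d : Nat) : Int) + ((j : Nat) : Int) = ((d + j : Nat) : Int) := by push_cast; ring
  simp only [Function.comp, zero_add, hc]
  rw [PySem.List.pyGetD_natCast]

theorem main_pos (s t : String) (n m : Int) (hn : 0 ≤ n) (hm : 0 < m)
    (hs : n ≤ (s.toList.length : Int) ∨ n ≤ 0) (hM : m ≤ max n 0 + 1) :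
    solution s t n m = solution_alt s t n m := by
  obtain ⟨N, rfl⟩ : ∃ N : Nat, n = (N : Int) := ⟨n.toNat, (Int.toNat_of_nonneg hn).symm⟩
  obtain ⟨M, rfl⟩ : ∃ M : Nat, m = (M : Int) := ⟨m.toNat, (Int.toNat_of_nonneg (le_of_lt hm)).symm⟩
  have hsN : N ≤ s.toList.length := by omega
  have hMN : M ≤ N + 1 := by
    have : max (N : Int) 0 = (N : Int) := by omega
    omega
  rw [solution_eq_sum s t N M hsN hMN]
  have hδ : ((N : Int) - (M : Int) + 1) = ((N + 1 - M : Nat) : Int) := by omega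
  simp only [solution_alt]
  rw [if_neg (show ¬ (M : Int) ≤ 0 by omega), hδ, alt_eq_sum s t (N + 1 - M) M, Finset.sum_comm]
  apply Finset.sum_congr rfl
  intro j hj
  by_cases hct : t.toList.getD j ' ' = 'a'
  · rw [if_pos hct, cnt_window s.toList j (N + 1 - M)]
    have hterm : ∀ d : Nat,
        (if (s.toList.getD (d + j) ' ' = 'a') ≠ (t.toList.getD j ' ' = 'a') then (1 : Int) else 0)
        = 1 - (if s.toList.getD (j + d) ' ' = 'a' then (1 : Int) else 0) := by
      intro d
      rw [Nat.add_comm d j]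
      by_cases h : s.toList.getD (j + d) ' ' = 'a'
      · rw [if_neg (fun hh => hh (propext (iff_of_true h hct))), if_pos h]; ring
      · rw [if_pos (fun hh : _ = _ => h (cast hh.symm hct)), if_neg h]; ring
    rw [Finset.sum_congr rfl (fun d _ => hterm d), Finset.sum_sub_distrib,
        Finset.sum_const, Finset.card_range, nsmul_eq_mul, mul_one]
  · rw [if_neg hct, cnt_window s.toList j (N + 1 - M)]
    apply Finset.sum_congr rfl
    intro d _
    have hiff : ((s.toList.getD (d + j) ' ' = 'a') ≠ (t.toList.getD j ' ' = 'a'))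
        ↔ (s.toList.getD (j + d) ' ' = 'a') := by
      rw [Nat.add_comm d j]
      by_cases h : s.toList.getD (j + d) ' ' = 'a'
      · exact ⟨fun _ => h, fun _ hh => hct (hh ▸ h)⟩
      · exact ⟨fun hh => absurd (propext (iff_of_false h hct)) hh, fun hh => absurd hh h⟩
    rw [if_congr hiff rfl rfl]

theorem main_neg (s t : String) (n m : Int) (hn : ¬ 0 ≤ n) (hm : 0 < m)
    (ht : m ≤ (t.toList.length : Int)) (h1 : m ≤ max n 0 + 1) (h2 : m ≤ n + 2 + max n 0)
    (hnD : ¬ D_solution s t n m) :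
    solution s t n m = solution_alt s t n m := by
  have hmax : max n 0 = 0 := by omega
  have hn1 : n = -1 := by omega
  have hm1 : m = 1 := by omega
  subst hn1 hm1
  obtain ⟨c, cs', hcs⟩ : ∃ c cs', t.toList = c :: cs' := by
    cases h : t.toList with
    | nil => rw [h] at ht; simp at ht
    | cons c cs' => exact ⟨c, cs', rfl⟩
  have hc : c ≠ 'a' := by
    intro h; exact hnD ⟨rfl, rfl, by rw [hcs, h]; rfl⟩
  have e1 : (-1 - 1 + 1 : Int) = -1 := by norm_num
  simp only [solution, solution_alt, e1, if_neg (show ¬ (1:Int) ≤ 0 by norm_num),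
    PySem.List.pyRange_one_eq_nil (by norm_num : (-1:Int) ≤ (0:Int)), List.foldl_nil]
  rw [PySem.List.pyRange_one]
  norm_num
  simp [hcs, PySem.List.pyGetD_zero_cons, hc, PySem.List.pyGetD]
  decide

theorem main_nonpos (s t : String) (n m : Int) (hm : m ≤ 0) :
    solution s t n m = solution_alt s t n m := by
  simp only [solution, solution_alt, PySem.List.pyRange_one_eq_nil hm, List.foldl_nil, if_pos hm]

theorem tight_compute (s t : String) (h : t.toList.head? = some 'a') :
    solution s t (-1) 1 = -1 ∧ solution_alt s t (-1) 1 = 0 := by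
  obtain ⟨c, cs', hcs⟩ : ∃ c cs', t.toList = c :: cs' := by
    cases hh : t.toList with
    | nil => rw [hh] at h; simp at h
    | cons c cs' => exact ⟨c, cs', rfl⟩
  have hc : c = 'a' := by rw [hcs] at h; simpa using h
  have e1 : (-1 - 1 + 1 : Int) = -1 := by norm_num
  constructor
  · simp only [solution, e1,
      PySem.List.pyRange_one_eq_nil (by norm_num : (-1:Int) ≤ (0:Int)), List.foldl_nil]
    rw [PySem.List.pyRange_one]
    norm_num
    simp [hcs, PySem.List.pyGetD_zero_cons, hc, PySem.List.pyGetD]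
    decide
  · simp only [solution_alt, e1, if_neg (show ¬ (1:Int) ≤ 0 by norm_num),
      PySem.List.pyRange_one_eq_nil (by norm_num : (-1:Int) ≤ (0:Int)), List.foldl_nil]

-- ===== VERDICT (by name: the statement is the Claim_ definition above) =====
theorem solution_spec : Claim_unchanged_solution := by
  intro s t n m hDom hPre hnD
  obtain ⟨hA, hB⟩ := hPre
  by_cases hm : m ≤ 0
  · exact main_nonpos s t n m hm
  · push_neg at hm
    obtain ⟨ht, h1, h2⟩ := hB.resolve_left (by omega)
    by_cases hn : 0 ≤ n
    · exact main_pos s t n m hn hm hA h1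
    · exact main_neg s t n m hn hm ht h1 h2 hnD

theorem solution_tight : Claim_exact_solution := by
  intro s t n m hDom hPre hD
  obtain ⟨hn, hm, hh⟩ := hD
  subst hn hm
  obtain ⟨ha, hb⟩ := tight_compute s t hh
  rw [ha, hb]
  decide

theorem solution_changed : Claim_changed_solution := by unfold Claim_changed_solution; decide
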